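-- pv_equiv track=rewrite | github.com/vishnuchalla/BugZooka | src/xmlparser.py | extract_orion_changepoint_context
-- ===== SOURCE A (Python) =====
-- def extract_orion_changepoint_context(failure_text):
--     """
--     Extracts changepoints.
--
--     :param failure_text: failures xml text
--     :return: chanepoints string
--     """
--     lines = failure_text.strip().splitlines()
--     changepoint_idx = -1
--     header_line = None
--
--     # Find the header and changepoint
--     for i, line in enumerate(lines):
--         if "uuid" in line and "timestamp" in line:
--             header_line = (
--                 f"| {'idx':<3} | {'uuid':<4} | {'timestamp':<10} | {'buildUrl':<10} | "
--                 f"{'metric':<10} | {'is_changepoint':<15} | {'percentage_change':<20} |"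
--             )
--         if "-- changepoint" in line:
--             changepoint_idx = i
--             break
--
--     # Extract the lines: header, two before, the changepoint, and two after
--     context = []
--     if changepoint_idx != -1:
--         start = max(0, changepoint_idx - 2)
--         end = min(len(lines), changepoint_idx + 3)
--         context_lines = lines[start:end]
--
--         if header_line:
--             context.append("Header:\n" + header_line)
--         context.append("\nChangepoint Context:")
--         context.extend(context_lines)
--
--     return "\n".join(context) if context else "No changepoint found."
-- ===== SOURCE B (Python) =====
-- HEADER = (
--     "| idx | uuid | timestamp  | buildUrl   | metric     "
--     "| is_changepoint  | percentage_change    |"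
-- )
--
--
-- def extract_orion_changepoint_context(failure_text):
--     # Streaming pass with a two-line lookbehind buffer: no indices, no slicing.
--     lines = iter(failure_text.strip().splitlines())
--     prev = []  # at most the last two lines seen before the current one
--     has_header = False
--     for line in lines:
--         if "uuid" in line and "timestamp" in line:
--             has_header = True
--         if "-- changepoint" in line:
--             window = prev + [line] + [nxt for _, nxt in zip(range(2), lines)]
--             parts = ["Header:\n" + HEADER] if has_header else []
--             parts.append("\nChangepoint Context:")
--             return "\n".join(parts + window)
--         prev = (prev + [line])[-2:]
--     return "No changepoint found."
-- ===== Notes on version B (the rewrite author's own statement) =====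
-- stated objective: alternative
-- what changed: Replaces A's index-based scan (enumerate, break, then max/min index arithmetic and list slicing) by a single streaming pass that maintains a two-line lookbehind buffer and a header flag, and on hitting the changepoint line returns immediately with the window assembled from the buffer, the line itself and the next two lines of the stream - no indices, no slicing.
import Mathlib
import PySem

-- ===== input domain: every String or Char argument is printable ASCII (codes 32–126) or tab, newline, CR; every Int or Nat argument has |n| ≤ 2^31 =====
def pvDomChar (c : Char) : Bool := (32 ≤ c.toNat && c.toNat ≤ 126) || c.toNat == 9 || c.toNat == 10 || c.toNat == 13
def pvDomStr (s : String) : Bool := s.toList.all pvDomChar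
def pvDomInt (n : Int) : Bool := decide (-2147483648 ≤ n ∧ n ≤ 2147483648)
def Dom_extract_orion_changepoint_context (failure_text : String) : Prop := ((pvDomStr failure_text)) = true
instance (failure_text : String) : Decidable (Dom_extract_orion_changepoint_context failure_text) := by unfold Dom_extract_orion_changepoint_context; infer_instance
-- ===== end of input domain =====

-- B replaces A's index-based scan + max/min slicing by a single streaming pass with a
-- two-line lookbehind buffer that returns the window directly (no indices, no slicing);
-- objective: alternative.

-- ===== PORT A =====

def pvHeaderStr : String :=
  "| idx | uuid | timestamp  | buildUrl   | metric     | is_changepoint  | percentage_change    |"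

def pvIsHeader (line : String) : Bool :=
  PySem.Str.isIn "uuid" line && PySem.Str.isIn "timestamp" line

def pvIsCp (line : String) : Bool := PySem.Str.isIn "-- changepoint" line

-- A's single loop: carries (i, header_line), breaks at the first changepoint line.
def pvLoopA : List String → Nat → Option String → (Int × Option String)
  | [], _, h => (-1, h)
  | line :: rest, i, h =>
    let h' := if pvIsHeader line then some pvHeaderStr else h
    if pvIsCp line then ((i : Int), h')
    else pvLoopA rest (i + 1) h'

def extract_orion_changepoint_context (failure_text : String) : String :=
  let lines := PySem.Str.splitlines (PySem.Str.strip failure_text)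
  let r := pvLoopA lines 0 none
  let changepoint_idx := r.1
  let header_line := r.2
  let context : List String :=
    if changepoint_idx ≠ -1 then
      let start := max 0 (changepoint_idx - 2)
      let stop := min (lines.length : Int) (changepoint_idx + 3)
      let context_lines := PySem.List.slice lines (some start) (some stop)
      (match header_line with
       | some h => ["Header:\n" ++ h]
       | none => []) ++ ["\nChangepoint Context:"] ++ context_lines
    else []
  if context ≠ [] then PySem.Str.join "\n" context else "No changepoint found."

-- ===== PORT B =====

-- B's streaming loop: a ≤2-line lookbehind buffer and a header flag; at the first
-- changepoint line it returns the flag and the ready-made window (buffer, the line,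
-- and the next two lines of the stream).
def pvLoopB : List String → List String → Bool → Option (Bool × List String)
  | [], _, _ => none
  | line :: rest, prev, hh =>
    let hh' := hh || pvIsHeader line
    if pvIsCp line then
      some (hh', prev ++ [line] ++ rest.take 2)
    else
      pvLoopB rest (PySem.List.slice (prev ++ [line]) (some (-2)) none) hh'

def extract_orion_changepoint_context_alt (failure_text : String) : String :=
  let lines := PySem.Str.splitlines (PySem.Str.strip failure_text)
  match pvLoopB lines [] false with
  | none => "No changepoint found."
  | some (hh, window) =>
    let parts : List String :=
      (if hh then ["Header:\n" ++ pvHeaderStr] else []) ++ ["\nChangepoint Context:"]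
    PySem.Str.join "\n" (parts ++ window)

-- ===== PRECONDITION & SPEC =====
def Spec_extract_orion_changepoint_context (failure_text : String) (out : String) : Prop := out = extract_orion_changepoint_context_alt failure_text
instance (failure_text : String) (out : String) : Decidable (Spec_extract_orion_changepoint_context failure_text out) := by unfold Spec_extract_orion_changepoint_context; infer_instance

-- ===== CLAIM =====
def Claim_equal_extract_orion_changepoint_context : Prop := ∀ (failure_text : String), Dom_extract_orion_changepoint_context failure_text → Spec_extract_orion_changepoint_context failure_text (extract_orion_changepoint_context failure_text)

-- ===== LEMMAS AND PROOFS =====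

-- index of the first changepoint line (proof-only characterisation device)
def pvFindCp : List String → Option Nat
  | [] => none
  | line :: rest =>
    if pvIsCp line then some 0 else (pvFindCp rest).map (· + 1)

-- keep the last (at most) two elements
def pvLast2 (xs : List String) : List String := xs.drop (xs.length - 2)

theorem pvSliceNeg2 (xs : List String) :
    PySem.List.slice xs (some (-2)) none = pvLast2 xs := by
  rw [PySem.List.slice_from_neg_ofNat xs 2 (by omega)]; rfl

theorem pvLast2_short (xs : List String) (h : xs.length ≤ 2) : pvLast2 xs = xs := by
  unfold pvLast2
  have : xs.length - 2 = 0 := by omega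
  simp [this]

theorem pvLast2_len (xs : List String) : (pvLast2 xs).length ≤ 2 := by
  unfold pvLast2; simp; omega

theorem pvLast2_append (a b : List String) : pvLast2 (pvLast2 a ++ b) = pvLast2 (a ++ b) := by
  unfold pvLast2
  rcases Nat.lt_or_ge a.length 2 with h | h
  · have h0 : a.length - 2 = 0 := by omega
    simp [h0]
  · have e1 : (a.drop (a.length - 2) ++ b).length - 2 = b.length := by simp; omega
    rw [e1, List.drop_append, List.drop_append, List.drop_drop]
    congr 1
    · congr 1
      simp
      omega
    · congr 1
      simp
      omega

theorem pvFindCp_lt (lines : List String) : ∀ j, pvFindCp lines = some j → j < lines.length := by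
  induction lines with
  | nil => intro j h; simp [pvFindCp] at h
  | cons line rest ih =>
    intro j h
    simp only [pvFindCp] at h
    split at h
    · simp at h; subst h; simp
    · cases hf : pvFindCp rest with
      | none => rw [hf] at h; simp at h
      | some k =>
        rw [hf] at h; simp at h
        have := ih k hf
        simp
        omega

-- B's loop, characterised via the changepoint index (the buffer invariant: ≤ 2 lines).
theorem pvLoopB_eq (lines : List String) : ∀ (prev : List String) (hh : Bool),
    prev.length ≤ 2 →
    pvLoopB lines prev hh =
      match pvFindCp lines with
      | none => none
      | some j => some (hh || (lines.take (j + 1)).any pvIsHeader,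
          pvLast2 (prev ++ lines.take j) ++ (lines.drop j).take 3) := by
  induction lines with
  | nil => intro prev hh _; simp [pvLoopB, pvFindCp]
  | cons line rest ih =>
    intro prev hh hp
    simp only [pvLoopB, pvFindCp]
    by_cases hc : pvIsCp line = true
    · rw [if_pos hc, if_pos hc]
      dsimp only
      rw [List.take_zero, List.append_nil, pvLast2_short prev hp]
      simp [List.take_succ_cons]
    · rw [if_neg hc, if_neg hc, pvSliceNeg2,
          ih _ _ (pvLast2_len _)]
      cases hf : pvFindCp rest with
      | none => simp
      | some j =>
        simp only [Option.map_some]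
        congr 1
        refine Prod.ext ?_ ?_
        · simp [List.take_succ_cons, Bool.or_assoc]
        · show pvLast2 (pvLast2 (prev ++ [line]) ++ rest.take j) ++ (rest.drop j).take 3 = _
          rw [pvLast2_append, List.take_succ_cons, List.append_assoc]
          simp [List.drop_succ_cons]

-- A's loop, characterised via the same index.
theorem pvLoopA_eq (lines : List String) : ∀ (i : Nat) (h : Option String),
    pvLoopA lines i h =
      match pvFindCp lines with
      | none => (-1, if lines.any pvIsHeader then some pvHeaderStr else h)
      | some j => ((i + j : Nat),
          if (lines.take (j + 1)).any pvIsHeader then some pvHeaderStr else h) := by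
  induction lines with
  | nil => intro i h; simp [pvLoopA, pvFindCp]
  | cons line rest ih =>
    intro i h
    simp only [pvLoopA, pvFindCp]
    by_cases hc : pvIsCp line = true
    · by_cases hhd : pvIsHeader line = true <;> simp [hc, hhd]
    · rw [if_neg hc, if_neg hc, ih]
      cases hf : pvFindCp rest with
      | none =>
        by_cases hhd : pvIsHeader line = true <;> simp [hhd, List.any_cons]
      | some j =>
        by_cases hhd : pvIsHeader line = true <;>
          simp [hhd, List.take_succ_cons, List.any_cons] <;> omega

-- A's max/min slice equals B's window, for an in-range index.
theorem pvWindow_eq (lines : List String) (j : Nat) (hj : j < lines.length) :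
    PySem.List.slice lines (some (max 0 ((j : Int) - 2))) (some (min (lines.length : Int) ((j : Int) + 3)))
      = pvLast2 (lines.take j) ++ (lines.drop j).take 3 := by
  have hs : max 0 ((j : Int) - 2) = ((j - 2 : Nat) : Int) := by push_cast; omega
  have he : min (lines.length : Int) ((j : Int) + 3) = ((min lines.length (j + 3) : Nat) : Int) := by
    push_cast; omega
  rw [hs, he, PySem.List.slice_natCast]
  unfold pvLast2
  have hlen : (lines.take j).length = j := by simp; omega
  rw [hlen]
  have hd : lines.drop (j - 2) = (lines.take j).drop (j - 2) ++ lines.drop j := by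
    conv_lhs => rw [← List.take_append_drop j lines]
    rw [List.drop_append_of_le_length (by rw [hlen]; omega)]
  rw [hd]
  have hdl : ((lines.take j).drop (j - 2)).length = j - (j - 2) := by rw [List.length_drop, hlen]
  have harith : min lines.length (j + 3) - (j - 2)
      = ((lines.take j).drop (j - 2)).length + min (lines.length - j) 3 := by
    rw [hdl]; omega
  rw [harith, List.take_append]
  congr 1
  · exact List.take_of_length_le (Nat.le_add_right _ _)
  · rw [Nat.add_sub_cancel_left]
    rcases Nat.le_total (lines.length - j) 3 with h3 | h3
    · have hmin : min (lines.length - j) 3 = lines.length - j := by omega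
      rw [hmin, List.take_of_length_le (by simp), List.take_of_length_le (by simp; omega)]
    · have hmin : min (lines.length - j) 3 = 3 := by omega
      rw [hmin]

-- ===== VERDICT =====
theorem extract_orion_changepoint_context_spec : Claim_equal_extract_orion_changepoint_context := by
  intro failure_text _
  unfold Spec_extract_orion_changepoint_context
  unfold extract_orion_changepoint_context extract_orion_changepoint_context_alt
  dsimp only
  rw [pvLoopA_eq, pvLoopB_eq _ _ _ (by simp)]
  cases hf : pvFindCp (PySem.Str.splitlines (PySem.Str.strip failure_text)) with
  | none =>
    dsimp only
    rw [if_neg (by norm_num : ¬((-1 : Int) ≠ -1))]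
    rw [if_neg (by simp : ¬(([] : List String) ≠ []))]
  | some j =>
    dsimp only
    rw [if_pos (by omega : ((0 + j : Nat) : Int) ≠ -1)]
    have hj := pvFindCp_lt _ j hf
    have hw := pvWindow_eq _ j hj
    simp only [Nat.zero_add, List.nil_append] at *
    rw [hw]
    by_cases hh : ((PySem.Str.splitlines (PySem.Str.strip failure_text)).take (j + 1)).any pvIsHeader = true
    · rw [if_pos hh]; simp [hh]
    · rw [if_neg hh]
      simp only [Bool.not_eq_true] at hh
      simp [hh]
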